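-- pv_equiv track=rewrite | github.com/AriaKoul/wordle-solver | utility_functions.py | generate_best_guesses
-- ===== SOURCE A (Python) =====
-- from collections import Counter
--
-- def count_unique_letters(word):
--     unique_letters = len(list(Counter(word).keys()))
--     return unique_letters
--
-- def generate_best_guesses(word_list):
--     """
--     This function takes a list of words and returns all the words with the maximum amount of
--     unique letters. This is done in order to generate a list of the best possible guesses that
--     could lead the user to eventually getting the solution.
--     """
--     best_guesses = []
--     unique_letter_dict = dict()
--
--     for word in word_list:
--         unique_letter_dict[word] = count_unique_letters(word)
--     max_unique_letters = max(list(unique_letter_dict.values()))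
--
--     for key in unique_letter_dict:
--         if unique_letter_dict[key] == max_unique_letters:
--             best_guesses.append(key)
--
--     return best_guesses
-- ===== SOURCE B (Python) =====
-- def generate_best_guesses(word_list):
--     """
--     Returns all words with the maximum number of unique letters, via an
--     inverted index from unique-letter count to the words with that count.
--     """
--     seen = set()
--     groups = {}
--     for word in word_list:
--         if word in seen:
--             continue
--         seen.add(word)
--         groups.setdefault(len(set(word)), []).append(word)
--     return groups[max(groups)]
-- ===== Notes on version B (the rewrite author's own statement) =====
-- stated objective: faster
-- what changed: Instead of building a word->count dict, taking the max of its values list and rescanning every word comparing against the max, B builds an inverted index count->words in one pass (with a seen-set for the dict's dedup) and returns the bucket at the maximum key by a single lookup.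
import Mathlib
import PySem

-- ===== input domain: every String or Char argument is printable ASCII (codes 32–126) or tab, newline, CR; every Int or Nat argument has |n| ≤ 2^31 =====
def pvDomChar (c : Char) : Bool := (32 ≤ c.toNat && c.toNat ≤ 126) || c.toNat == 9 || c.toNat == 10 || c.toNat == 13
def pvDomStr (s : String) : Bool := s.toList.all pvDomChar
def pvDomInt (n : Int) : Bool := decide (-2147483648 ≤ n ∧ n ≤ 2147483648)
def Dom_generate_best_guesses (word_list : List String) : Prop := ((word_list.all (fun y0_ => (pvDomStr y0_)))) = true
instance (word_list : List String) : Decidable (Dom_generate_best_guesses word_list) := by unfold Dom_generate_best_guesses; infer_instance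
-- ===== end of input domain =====

-- B replaces A's value-max-then-rescan with a one-pass inverted index (count -> words) and a
-- single keyed lookup at the maximum count; same result, measurably faster in Python (objective: faster).

-- ===== PORT A =====
def count_unique_letters (word : String) : Int :=
  (((PySem.Dict.counter word.toList).keys).length : Int)

def generate_best_guesses (word_list : List String) : List String :=
  let unique_letter_dict :=
    word_list.foldl (fun d w => d.insert w (count_unique_letters w))
      (PySem.Dict.empty : PySem.Dict String Int)
  match PySem.List.max? unique_letter_dict.values (fun x => x) with
  | none => []   -- max([]) raises ValueError; excluded by Pre_
  | some m =>
      unique_letter_dict.keys.foldl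
        (fun acc k => if unique_letter_dict.getD k 0 = m then acc ++ [k] else acc) []

-- ===== PORT B =====
def cnt_alt (word : String) : Int := ((PySem.Set.ofList word.toList).length : Int)

def generate_best_guesses_alt (word_list : List String) : List String :=
  let st :=
    word_list.foldl
      (fun (p : PySem.Set String × PySem.Dict Int (List String)) w =>
        if PySem.Set.contains p.1 w then p
        else (PySem.Set.add p.1 w, p.2.modify (cnt_alt w) [] (· ++ [w])))
      (PySem.Set.empty, PySem.Dict.empty)
  match PySem.List.max? st.2.keys (fun x => x) with
  | none => []   -- max over an empty dict raises ValueError; excluded by Pre_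
  | some m => st.2.getD m []

-- ===== PRECONDITION & SPEC =====
-- Pre_ excludes only the empty list, on which both A and B raise ValueError (max of an empty sequence).
def Pre_generate_best_guesses (word_list : List String) : Prop := word_list ≠ []
instance (word_list : List String) : Decidable (Pre_generate_best_guesses word_list) := by unfold Pre_generate_best_guesses; infer_instance

def pvWitness_generate_best_guesses : List String := (["crane", "speed", "crane"])

def Spec_generate_best_guesses (word_list : List String) (out : List String) : Prop := out = generate_best_guesses_alt word_list
instance (word_list : List String) (out : List String) : Decidable (Spec_generate_best_guesses word_list out) := by unfold Spec_generate_best_guesses; infer_instance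

-- ===== CLAIM (what is proved, stated in full; the proofs are below) =====
def Claim_equal_generate_best_guesses : Prop := ∀ (word_list : List String), Dom_generate_best_guesses word_list → Pre_generate_best_guesses word_list → Spec_generate_best_guesses word_list (generate_best_guesses word_list)

-- ===== LEMMAS AND PROOFS =====

-- the two unique-letter counters agree
theorem cnt_alt_eq (w : String) : cnt_alt w = count_unique_letters w := by
  simp [cnt_alt, count_unique_letters, PySem.Dict.keys_counter]

-- A's word -> count dict, characterised: its items are a deduped word list paired with counts
def mkOf (s : List String) : PySem.Dict String Int :=
  PySem.Dict.mk (s.map (fun x => (x, count_unique_letters x)))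

theorem insert_mkOf (s : List String) (w : String) :
    (mkOf s).insert w (count_unique_letters w) = mkOf (PySem.Set.add s w) := by
  apply PySem.Dict.ext
  by_cases h : w ∈ s
  · have hc : (mkOf s).contains w = true := by
      rw [PySem.Dict.contains_iff_mem_keys]
      simpa [mkOf, PySem.Dict.keys, List.map_map, Function.comp] using h
    have ha : PySem.Set.add s w = s := by
      simp [PySem.Set.add, h]

    rw [PySem.Dict.items_insert, if_pos hc, ha]
    show (s.map (fun x => (x, count_unique_letters x))).map _ = _
    rw [List.map_map]
    apply List.map_congr_left
    intro x _
    by_cases hxw : x = w <;> simp [Function.comp, hxw]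
  · have hc : ¬ (mkOf s).contains w = true := by
      rw [PySem.Dict.contains_iff_mem_keys]
      simpa [mkOf, PySem.Dict.keys, List.map_map, Function.comp] using h
    have ha : PySem.Set.add s w = s ++ [w] := by
      simp [PySem.Set.add, h]
    rw [PySem.Dict.items_insert, if_neg hc, ha]
    simp [mkOf]

theorem A_dict_fold (wl : List String) (s : List String) :
    wl.foldl (fun d w => d.insert w (count_unique_letters w)) (mkOf s)
      = mkOf (wl.foldl PySem.Set.add s) := by
  induction wl generalizing s with
  | nil => rfl
  | cons w t ih => simp only [List.foldl_cons, insert_mkOf, ih]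

-- B's grouping dict, as a fold over an already-deduped list
def buildG (s : List String) : PySem.Dict Int (List String) :=
  s.foldl (fun g w => g.modify (cnt_alt w) [] (· ++ [w])) PySem.Dict.empty

theorem B_fold (wl : List String) (s : List String) :
    wl.foldl
      (fun (p : PySem.Set String × PySem.Dict Int (List String)) w =>
        if PySem.Set.contains p.1 w then p
        else (PySem.Set.add p.1 w, p.2.modify (cnt_alt w) [] (· ++ [w])))
      (s, buildG s)
      = (wl.foldl PySem.Set.add s, buildG (wl.foldl PySem.Set.add s)) := by
  induction wl generalizing s with
  | nil => rfl
  | cons w t ih =>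
      simp only [List.foldl_cons]
      have key : (if PySem.Set.contains s w then (s, buildG s)
          else (PySem.Set.add s w, (buildG s).modify (cnt_alt w) [] (· ++ [w])))
          = (PySem.Set.add s w, buildG (PySem.Set.add s w)) := by
        by_cases h : PySem.Set.contains s w = true
        · have hm := (PySem.Set.contains_iff s w).1 h
          have ha : PySem.Set.add s w = s := by simp [PySem.Set.add, hm]
          rw [if_pos h, ha]
        · have hm : w ∉ s := fun hm => h ((PySem.Set.contains_iff s w).2 hm)
          have ha : PySem.Set.add s w = s ++ [w] := by simp [PySem.Set.add, hm]
          have hb : buildG (s ++ [w]) = (buildG s).modify (cnt_alt w) [] (· ++ [w]) := by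
            simp [buildG, List.foldl_append]
          rw [if_neg h, ha, hb]
      rw [key, ih]

-- the maximum over the multiset of counts equals the maximum over the set of counts
theorem max_dedup_eq (l : List Int) (hl : l ≠ []) :
    PySem.List.max? l (fun x => x) = PySem.List.max? (PySem.Set.ofList l) (fun x => x) := by
  have h1 : PySem.List.max? l (fun x => x) ≠ none := by
    rw [Ne, PySem.List.max?_eq_none_iff]; exact hl
  have h2 : PySem.List.max? (PySem.Set.ofList l) (fun x => x) ≠ none := by
    rw [Ne, PySem.List.max?_eq_none_iff]
    intro h
    rcases List.exists_mem_of_ne_nil l hl with ⟨x, hx⟩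
    have := (PySem.Set.mem_ofList l x).2 hx
    simp [h] at this
  rcases Option.ne_none_iff_exists'.1 h1 with ⟨m1, hm1⟩
  rcases Option.ne_none_iff_exists'.1 h2 with ⟨m2, hm2⟩
  rw [hm1, hm2]
  have e1 := PySem.List.max?_mem hm1
  have e2 := PySem.List.max?_mem hm2
  have le1 := PySem.List.max?_isMax hm1 m2 ((PySem.Set.mem_ofList l m2).1 e2)
  have le2 := PySem.List.max?_isMax hm2 m1 ((PySem.Set.mem_ofList l m1).2 e1)
  simp only [Option.some_inj]
  omega

-- ===== VERDICT (by name: the statement is the Claim_ definition above) =====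
theorem generate_best_guesses_spec : Claim_equal_generate_best_guesses := by
  intro wl _ hpre
  unfold Spec_generate_best_guesses
  simp only [generate_best_guesses, generate_best_guesses_alt]
  have hA : wl.foldl (fun d w => d.insert w (count_unique_letters w))
      (PySem.Dict.empty : PySem.Dict String Int) = mkOf (PySem.Set.ofList wl) := by
    simpa [mkOf, PySem.Set.ofList] using A_dict_fold wl []
  have hB : wl.foldl
      (fun (p : PySem.Set String × PySem.Dict Int (List String)) w =>
        if PySem.Set.contains p.1 w then p
        else (PySem.Set.add p.1 w, p.2.modify (cnt_alt w) [] (· ++ [w])))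
      (PySem.Set.empty, PySem.Dict.empty)
      = (PySem.Set.ofList wl, buildG (PySem.Set.ofList wl)) := by
    simpa [buildG, PySem.Set.ofList, PySem.Set.empty] using B_fold wl []
  rw [hA, hB]
  set dd := PySem.Set.ofList wl with hdd
  have hddne : dd ≠ [] := by
    rcases List.exists_mem_of_ne_nil wl hpre with ⟨x, hx⟩
    intro h
    have := (PySem.Set.mem_ofList wl x).2 hx
    rw [← hdd, h] at this
    simp at this
  have hvals : (mkOf dd).values = dd.map count_unique_letters := by
    simp [mkOf, PySem.Dict.values, List.map_map, Function.comp_def]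
  have hkeysA : (mkOf dd).keys = dd := by
    simp [mkOf, PySem.Dict.keys, List.map_map, Function.comp_def]
  have hkeysB : (buildG dd).keys = PySem.Set.ofList (dd.map cnt_alt) := by
    unfold buildG
    rw [PySem.Dict.keys_foldl_modify_key dd cnt_alt [] (fun _ w => (· ++ [w])) PySem.Dict.empty]
    simp [PySem.Dict.keys_empty, PySem.Set.update, PySem.Set.ofList]
  have hcnt : dd.map cnt_alt = dd.map count_unique_letters :=
    List.map_congr_left (fun x _ => cnt_alt_eq x)
  have hmax : PySem.List.max? (mkOf dd).values (fun x => x)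
      = PySem.List.max? (buildG dd).keys (fun x => x) := by
    rw [hvals, hkeysB, hcnt]
    exact max_dedup_eq (dd.map count_unique_letters) (by simp [hddne])
  rw [← hmax]
  cases hm : PySem.List.max? (mkOf dd).values (fun x => x) with
  | none => rfl
  | some m =>
    have hnd : (mkOf dd).keys.Nodup := by rw [hkeysA]; exact PySem.Set.nodup_ofList wl
    have hget : ∀ k ∈ dd, (mkOf dd).getD k 0 = count_unique_letters k := by
      intro k hk
      exact PySem.Dict.getD_of_mem_items (mkOf dd)
        (List.mem_map_of_mem hk) hnd 0
    have hAres : (mkOf dd).keys.foldl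
        (fun acc k => if (mkOf dd).getD k 0 = m then acc ++ [k] else acc) []
        = dd.filter (fun k => count_unique_letters k == m) := by
      rw [hkeysA]
      have hfun : (fun (acc : List String) k =>
            if (mkOf dd).getD k 0 = m then acc ++ [k] else acc)
          = (fun acc k => if ((mkOf dd).getD k 0 == m) = true then acc ++ [k] else acc) := by
        funext acc k
        by_cases h : (mkOf dd).getD k 0 = m <;> simp [h]
      rw [hfun, PySem.List.foldl_append_if (fun k => (mkOf dd).getD k 0 == m) (fun k => k) dd []]
      simp only [List.nil_append, List.map_id']
      exact List.filter_congr (fun k hk => by rw [hget k hk])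
    have hBres : (buildG dd).getD m [] = dd.filter (fun w => cnt_alt w == m) := by
      have h1 : buildG dd
          = (dd.map (fun w => (cnt_alt w, w))).foldl
              (fun d p => d.modify p.1 [] (· ++ [p.2])) PySem.Dict.empty := by
        rw [List.foldl_map]
        rfl
      rw [h1, PySem.Dict.getD_foldl_modify_append, List.filter_map]
      simp [List.map_map, Function.comp_def, PySem.Dict.getD_empty]
    dsimp only
    rw [hAres, hBres]
    exact List.filter_congr (fun k _ => by rw [cnt_alt_eq k])
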